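-- pv_equiv track=rewrite | github.com/pvdwijdeven/DSA_Python3 | G4G/DSA Course/Queue/GenerateFirstNWithGivenDigits.py | get_first_N
-- ===== SOURCE A (Python) =====
-- from collections import deque
--
-- def get_first_N(n, digits) -> list[str]:
--     q = deque()
--     res: list[str] = []
--     for digit in digits:
--         q.append(str(object=digit))
--     i = 0
--     while (i + len(q)) < n:
--         curr = q.popleft()
--         res.append(curr)
--         for digit in digits:
--             q.append(curr + str(object=digit))
--         i += 1
--     while i < n:
--         res.append(q.popleft())
--         i += 1
--     return res
-- ===== SOURCE B (Python) =====
-- def get_first_N(n, digits) -> list[str]: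
--     b = len(digits)
--     res: list[str] = []
--     for i in range(1, n + 1):
--         m, s = i, ""
--         while m > 0:
--             m, r = divmod(m - 1, b)
--             s = str(digits[r]) + s
--         res.append(s)
--     return res
-- ===== Notes on version B (the rewrite author's own statement) =====
-- stated objective: simpler
-- what changed: Replaces the BFS queue of parent strings with a direct rank-to-string conversion: the i-th output is computed on its own as the bijective base-len(digits) representation of i, so no queue of pending strings is kept.
import Mathlib
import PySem

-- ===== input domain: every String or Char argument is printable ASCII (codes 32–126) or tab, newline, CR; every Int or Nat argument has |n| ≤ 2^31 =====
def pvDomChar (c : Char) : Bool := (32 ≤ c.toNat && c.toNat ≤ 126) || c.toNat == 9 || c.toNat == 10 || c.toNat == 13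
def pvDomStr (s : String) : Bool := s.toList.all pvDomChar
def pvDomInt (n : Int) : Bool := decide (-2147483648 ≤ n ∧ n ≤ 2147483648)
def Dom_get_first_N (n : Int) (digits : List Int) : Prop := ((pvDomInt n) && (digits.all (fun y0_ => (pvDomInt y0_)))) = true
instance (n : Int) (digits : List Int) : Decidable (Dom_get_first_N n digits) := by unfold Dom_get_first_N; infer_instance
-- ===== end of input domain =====

-- B replaces A's BFS queue by computing each output string directly from its rank
-- (bijective base-len(digits) numeral); objective: simpler (no queue state).

-- ===== PORT A =====
-- second while loop: pops one element per step while i < n (empty pop = IndexError, excluded by Pre_)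
def get_first_N_loop2 (n : Int) (i : Int) (q : List String) (res : List String) : List String :=
  if i < n then
    match q with
    | [] => res            -- q.popleft() on empty deque raises; outside Pre_
    | x :: q' => get_first_N_loop2 n (i + 1) q' (res ++ [x])
  else res
termination_by (n - i).toNat
decreasing_by omega

-- first while loop: pop, record, push the popped string extended by each digit
def get_first_N_loop1 (n : Int) (digits : List Int) (i : Int) (q : List String) (res : List String) : List String :=
  if i + (q.length : Int) < n then
    match q with
    | [] => res            -- q.popleft() on empty deque raises; outside Pre_
    | curr :: q' =>
        get_first_N_loop1 n digits (i + 1)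
          (q' ++ digits.map (fun d => curr ++ PySem.Int.toStr d)) (res ++ [curr])
  else get_first_N_loop2 n i q res
termination_by (n - i).toNat
decreasing_by omega

def get_first_N (n : Int) (digits : List Int) : List String :=
  get_first_N_loop1 n digits 0 (digits.map (fun d => PySem.Int.toStr d)) []

-- ===== PORT B =====
-- inner while of Source B: peel bijective digits of m, prepending each symbol to s
-- (the 0 < b conjunct only makes the function total: with b = 0 and 0 < m Python's
-- divmod raises ZeroDivisionError, which Pre_ excludes)
def get_first_N_altLoop (digits : List Int) (b : Int) (m : Int) (s : String) : String :=
  if h : 0 < m ∧ 0 < b then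
    get_first_N_altLoop digits b (PySem.Int.floordiv (m - 1) b)
      (PySem.Int.toStr (PySem.List.pyGetD digits (PySem.Int.mod (m - 1) b) 0) ++ s)
  else s
termination_by m.toNat
decreasing_by
  have h1 : PySem.Int.floordiv (m - 1) b = (m - 1) / b := PySem.Int.floordiv_eq_ediv_of_pos h.2
  have h2 : (m - 1) / b ≤ m - 1 := Int.ediv_le_self _ (by omega)
  omega

def get_first_N_alt (n : Int) (digits : List Int) : List String :=
  (PySem.List.pyRange 1 (n + 1) 1).map
    (fun i => get_first_N_altLoop digits (digits.length : Int) i "")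

-- ===== PRECONDITION & SPEC =====
-- Pre_ excludes exactly the inputs where A raises (IndexError popping an empty
-- deque): digits = [] together with n > 0.  (B raises ZeroDivisionError there.)
def Pre_get_first_N (n : Int) (digits : List Int) : Prop := digits ≠ [] ∨ n ≤ 0
instance (n : Int) (digits : List Int) : Decidable (Pre_get_first_N n digits) := by
  unfold Pre_get_first_N; infer_instance

def pvWitness_get_first_N : Int × List Int := (7, [1, 2])

def Spec_get_first_N (n : Int) (digits : List Int) (out : List String) : Prop := out = get_first_N_alt n digits
instance (n : Int) (digits : List Int) (out : List String) : Decidable (Spec_get_first_N n digits out) := by unfold Spec_get_first_N; infer_instance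

-- ===== CLAIM (what is proved, stated in full; the proofs are below) =====
def Claim_equal_get_first_N : Prop := ∀ (n : Int) (digits : List Int), Dom_get_first_N n digits → Pre_get_first_N n digits → Spec_get_first_N n digits (get_first_N n digits)

-- ===== LEMMAS AND PROOFS =====

-- the string of rank m (1-based) in the length-then-digit-order enumeration:
-- the bijective base-(digits.length) numeral of m
def pvRep (digits : List Int) : Nat → String
  | 0 => ""
  | (m + 1) =>
      pvRep digits (m / digits.length) ++ PySem.Int.toStr (digits.getD (m % digits.length) 0)
decreasing_by exact Nat.lt_succ_of_le (Nat.div_le_self _ _)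

-- S k = the (k+1)-st output string
def pvS (digits : List Int) (k : Nat) : String := pvRep digits (k + 1)

lemma pvRep_zero (digits : List Int) : pvRep digits 0 = "" := by simp [pvRep]

lemma pvRep_succ (digits : List Int) (m : Nat) :
    pvRep digits (m + 1) =
      pvRep digits (m / digits.length) ++ PySem.Int.toStr (digits.getD (m % digits.length) 0) := by
  rw [pvRep]

lemma pvMap_getD (xs : List Int) (f : Int → String) :
    xs.map f = (List.range xs.length).map (fun i => f (xs.getD i 0)) := by
  apply List.ext_getElem
  · simp
  · intro i h1 h2
    simp at h1
    simp [List.getD_eq_getElem?_getD, List.getElem?_eq_getElem h1]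

lemma pvS_base (digits : List Int) (t : Nat) (ht : t < digits.length) :
    pvS digits t = PySem.Int.toStr (digits.getD t 0) := by
  unfold pvS
  rw [pvRep_succ, Nat.div_eq_of_lt ht, Nat.mod_eq_of_lt ht, pvRep_zero]
  exact String.empty_append

lemma pvS_child (digits : List Int) (k r : Nat) (hr : r < digits.length) :
    pvS digits ((k + 1) * digits.length + r) = pvS digits k ++ PySem.Int.toStr (digits.getD r 0) := by
  unfold pvS
  have hb : 0 < digits.length := by omega
  have e : (k + 1) * digits.length + r + 1 = (r + (k + 1) * digits.length) + 1 := by ring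
  rw [e, pvRep_succ, Nat.add_mul_div_right _ _ hb, Nat.div_eq_of_lt hr,
      Nat.add_mul_mod_self_right, Nat.mod_eq_of_lt hr, Nat.zero_add]

lemma pvRangeSucc (g : Nat → String) (c : Nat) :
    (List.range (1 + c)).map g = g 0 :: (List.range c).map (fun t => g (1 + t)) := by
  rw [List.range_add]
  simp [List.map_map, Function.comp]

lemma pvLoop2_spec (n : Int) : ∀ (q : List String) (i : Int) (res : List String),
    (n - i).toNat ≤ q.length →
    get_first_N_loop2 n i q res = res ++ q.take (n - i).toNat := by
  intro q
  induction q with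
  | nil =>
    intro i res h
    rw [get_first_N_loop2]
    simp at h
    split_ifs <;> simp [show (n - i).toNat = 0 by omega]
  | cons x q ih =>
    intro i res h
    rw [get_first_N_loop2]
    split_ifs with hin
    · rw [ih (i + 1) (res ++ [x]) (by simp at h ⊢; omega)]
      have e : (n - i).toNat = (n - (i + 1)).toNat + 1 := by omega
      rw [e, List.take_succ_cons, List.append_assoc, List.singleton_append]
    · have e : (n - i).toNat = 0 := by omega
      simp [e]

lemma pvLoop1_spec (n : Int) (digits : List Int) (hb : digits ≠ []) :
    ∀ (M k L : Nat) (res : List String), (n - (k : Int)).toNat ≤ M →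
    (k : Nat) + L = (k + 1) * digits.length →
    get_first_N_loop1 n digits (k : Int)
        ((List.range L).map (fun t => pvS digits (k + t))) res
      = res ++ (List.range (n - (k : Int)).toNat).map (fun t => pvS digits (k + t)) := by
  have hb' : 0 < digits.length := List.length_pos_iff.mpr hb
  intro M
  induction M with
  | zero =>
    intro k L res hM hinv
    rw [get_first_N_loop1.eq_def, if_neg (by simp; omega)]
    rw [pvLoop2_spec n _ _ _ (by simp; omega)]
    simp [show (n - (k : Int)).toNat = 0 by omega]
  | succ M ih =>
    intro k L res hM hinv
    have hL : 1 ≤ L := by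
      have h1 : (k + 1) * 1 ≤ (k + 1) * digits.length := Nat.mul_le_mul_left _ hb'
      omega
    obtain ⟨L', rfl⟩ : ∃ L', L = 1 + L' := ⟨L - 1, by omega⟩
    by_cases hq : (k : Int) + ((1 + L' : Nat) : Int) < n
    · -- pop pvS k, record it, push its digits.length children
      rw [pvRangeSucc, get_first_N_loop1, if_pos (by simp; push_cast at hq; omega)]
      have hq2 : (List.range L').map (fun t => pvS digits (k + (1 + t)))
          ++ digits.map (fun d => pvS digits (k + 0) ++ PySem.Int.toStr d)
          = (List.range (L' + digits.length)).map (fun t => pvS digits ((k + 1) + t)) := by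
        rw [List.range_add, List.map_append, List.map_map]
        congr 1
        · apply List.map_congr_left; intro t ht; congr 1; omega
        · rw [pvMap_getD digits (fun d => pvS digits (k + 0) ++ PySem.Int.toStr d)]
          apply List.map_congr_left
          intro r hr
          simp only [List.mem_range] at hr
          simp only [Function.comp_apply, Nat.add_zero]
          rw [← pvS_child digits k r hr]
          congr 1
          have e : (k + 1) * digits.length = k + (1 + L') := hinv.symm
          omega
      rw [hq2]
      have ek : (k : Int) + 1 = ((k + 1 : Nat) : Int) := by push_cast; ring
      rw [ek, ih (k + 1) (L' + digits.length) (res ++ [pvS digits (k + 0)])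
            (by push_cast; push_cast at hq; omega)
            (by have e2 : (k + 1 + 1) * digits.length = (k + 1) * digits.length + digits.length := by ring
                omega)]
      have hc : (n - (k : Int)).toNat = 1 + (n - ((k + 1 : Nat) : Int)).toNat := by push_cast; omega
      rw [hc, pvRangeSucc, List.append_assoc, List.singleton_append]
      congr 2
      apply List.map_congr_left
      intro t ht
      congr 1
      omega
    · -- exit the first loop: the second loop pops the remaining n - k strings
      rw [get_first_N_loop1.eq_def, if_neg (by simp; push_cast at hq; omega)]
      rw [pvLoop2_spec n _ _ _ (by simp; push_cast at hq ⊢; omega)]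
      have hcL : (n - (k : Int)).toNat ≤ 1 + L' := by push_cast at hq; omega
      rw [← List.map_take, List.take_range, Nat.min_eq_left hcL]

lemma pvAltLoop_rep (digits : List Int) (hb : digits ≠ []) :
    ∀ (m : Nat) (s : String),
    get_first_N_altLoop digits (digits.length : Int) (m : Int) s = pvRep digits m ++ s := by
  have hb' : 0 < digits.length := List.length_pos_iff.mpr hb
  intro m
  induction m using Nat.strong_induction_on with
  | _ m ih =>
    intro s
    match m with
    | 0 =>
      rw [get_first_N_altLoop, dif_neg (by simp), pvRep_zero, String.empty_append]
    | (m' + 1) =>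
      rw [get_first_N_altLoop,
        dif_pos ⟨by exact_mod_cast Nat.succ_pos m', by exact_mod_cast hb'⟩]
      have e : ((m' + 1 : Nat) : Int) - 1 = ((m' : Nat) : Int) := by push_cast; ring
      rw [e, PySem.Int.floordiv_natCast, PySem.Int.mod_natCast, PySem.List.pyGetD_natCast]
      rw [ih (m' / digits.length) (Nat.lt_succ_of_le (Nat.div_le_self _ _))]
      rw [pvRep_succ, String.append_assoc]

-- ===== VERDICT (by name: the statement is the Claim_ definition above) =====
theorem get_first_N_spec : Claim_equal_get_first_N := by
  intro n digits _ hpre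
  unfold Spec_get_first_N get_first_N get_first_N_alt
  by_cases hb : digits = []
  · subst hb
    have hn : n ≤ 0 := by
      cases hpre with
      | inl h => exact absurd rfl h
      | inr h => exact h
    rw [show ((0 : Int)) = ((0 : Nat) : Int) from rfl]
    rw [get_first_N_loop1.eq_def, if_neg (by simp; omega), get_first_N_loop2.eq_def, if_neg (by omega)]
    rw [PySem.List.pyRange_one_eq_nil (by omega)]
    simp
  · have hb' : 0 < digits.length := List.length_pos_iff.mpr hb
    -- A side: the BFS loop yields the first n.toNat ranked strings
    have hq0 : digits.map (fun d => PySem.Int.toStr d)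
        = (List.range digits.length).map (fun t => pvS digits ((0 : Nat) + t)) := by
      rw [pvMap_getD digits (fun d => PySem.Int.toStr d)]
      apply List.map_congr_left
      intro r hr
      simp only [List.mem_range] at hr
      rw [Nat.zero_add, pvS_base digits r hr]
    have hA : get_first_N_loop1 n digits ((0 : Nat) : Int)
          ((List.range digits.length).map (fun t => pvS digits ((0 : Nat) + t))) []
        = (List.range (n - ((0 : Nat) : Int)).toNat).map (fun t => pvS digits ((0 : Nat) + t)) := by
      rw [pvLoop1_spec n digits hb ((n - ((0 : Nat) : Int)).toNat) 0 digits.length []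
            (le_refl _) (by omega)]
      simp
    rw [show ((0 : Int)) = ((0 : Nat) : Int) from rfl, hq0, hA]
    -- B side: each rank is converted directly
    rw [PySem.List.pyRange_one]
    rw [List.map_map]
    have hlen : ((n + 1 - 1 : Int)).toNat = (n - ((0 : Nat) : Int)).toNat := by omega
    rw [hlen]
    apply List.map_congr_left
    intro t _
    simp only [Function.comp_apply, Nat.zero_add]
    have e1 : (1 : Int) + (t : Int) = ((t + 1 : Nat) : Int) := by push_cast; ring
    rw [e1, pvAltLoop_rep digits hb (t + 1) ""]
    rw [pvS]
    exact String.append_empty.symm
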